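-- pv_equiv track=rewrite | github.com/apprentice10/webserver | engine/sql_parser.py | _depth0_split
-- ===== SOURCE A (Python) =====
-- def _depth0_split(col_list_raw: str) -> list[str]:
--     """Split a SELECT column list on commas at depth 0 (ignores commas inside parentheses)."""
--     items = []
--     depth = 0
--     current: list[str] = []
--     for ch in col_list_raw:
--         if ch == '(':
--             depth += 1
--             current.append(ch)
--         elif ch == ')':
--             depth -= 1
--             current.append(ch)
--         elif ch == ',' and depth == 0:
--             items.append(''.join(current).strip())
--             current = []
--         else:
--             current.append(ch)
--     if current:
--         items.append(''.join(current).strip())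
--     return items
-- ===== SOURCE B (Python) =====
-- def _depth0_split(col_list_raw: str) -> list[str]:
--     """Split a SELECT column list on commas at depth 0 (ignores commas inside parentheses)."""
--     positions = []
--     depth = 0
--     for i, ch in enumerate(col_list_raw):
--         if ch == '(':
--             depth += 1
--         elif ch == ')':
--             depth -= 1
--         elif ch == ',' and depth == 0:
--             positions.append(i)
--     items = []
--     start = 0
--     for pos in positions:
--         items.append(col_list_raw[start:pos].strip())
--         start = pos + 1
--     if start < len(col_list_raw):
--         items.append(col_list_raw[start:].strip())
--     return items
-- ===== Notes on version B (the rewrite author's own statement) =====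
-- stated objective: alternative
-- what changed: B makes one pass recording the index of every depth-0 comma and a second pass cutting the string by slicing at those positions, instead of accumulating characters into a growing buffer; the trailing piece is emitted only when characters follow the last comma, matching A's non-empty flush.
import Mathlib
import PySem

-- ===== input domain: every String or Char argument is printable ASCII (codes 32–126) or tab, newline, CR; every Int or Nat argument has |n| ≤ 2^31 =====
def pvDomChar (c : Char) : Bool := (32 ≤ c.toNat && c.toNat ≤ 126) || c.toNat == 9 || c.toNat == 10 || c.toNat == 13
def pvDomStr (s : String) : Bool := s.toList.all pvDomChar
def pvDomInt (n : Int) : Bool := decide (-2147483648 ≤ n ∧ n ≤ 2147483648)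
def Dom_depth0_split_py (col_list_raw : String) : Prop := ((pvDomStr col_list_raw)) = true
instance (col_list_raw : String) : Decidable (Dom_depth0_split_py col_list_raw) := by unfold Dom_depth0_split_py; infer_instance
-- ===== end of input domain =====

-- B records depth-0 comma positions in one pass, then slices the string at them;
-- same cost as A, different decomposition (index positions + slicing vs a char accumulator).

-- ===== PORT A =====
-- A's single loop over the characters: state = (depth, current buffer, items);
-- ''.join(current).strip() is ported as String.mk (PySem.Chars.strip current).
def dsA : List Char → Int → List Char → List String → List String
  | [], _, current, items =>
      if current ≠ [] then items ++ [String.mk (PySem.Chars.strip current)] else items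
  | c :: rest, depth, current, items =>
      if c = '(' then dsA rest (depth + 1) (current ++ [c]) items
      else if c = ')' then dsA rest (depth - 1) (current ++ [c]) items
      else if c = ',' ∧ depth = 0 then
        dsA rest depth [] (items ++ [String.mk (PySem.Chars.strip current)])
      else dsA rest depth (current ++ [c]) items

def depth0_split_py (col_list_raw : String) : List String :=
  dsA col_list_raw.toList 0 [] []

-- ===== PORT B =====
-- first pass of Source B: enumerate the chars, keep only depth, record depth-0 comma indices
def dsBpos : List Char → Nat → Int → List Nat
  | [], _, _ => []
  | c :: rest, i, depth =>
      if c = '(' then dsBpos rest (i + 1) (depth + 1)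
      else if c = ')' then dsBpos rest (i + 1) (depth - 1)
      else if c = ',' ∧ depth = 0 then i :: dsBpos rest (i + 1) depth
      else dsBpos rest (i + 1) depth

-- second pass of Source B: walk the positions with a start cursor, slicing the string
def dsBsplit (s : List Char) : List Nat → Nat → List String
  | [], start =>
      if start < s.length then
        [String.mk (PySem.Chars.strip (PySem.List.slice s (some (start : Int)) none))]
      else []
  | p :: ps, start =>
      String.mk (PySem.Chars.strip (PySem.List.slice s (some (start : Int)) (some (p : Int))))
        :: dsBsplit s ps (p + 1)

def depth0_split_py_alt (col_list_raw : String) : List String :=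
  dsBsplit col_list_raw.toList (dsBpos col_list_raw.toList 0 0) 0

-- ===== PRECONDITION & SPEC =====
def Spec_depth0_split_py (col_list_raw : String) (out : List String) : Prop := out = depth0_split_py_alt col_list_raw
instance (col_list_raw : String) (out : List String) : Decidable (Spec_depth0_split_py col_list_raw out) := by unfold Spec_depth0_split_py; infer_instance

-- ===== CLAIM (what is proved, stated in full; the proofs are below) =====
def Claim_equal_depth0_split_py : Prop := ∀ (col_list_raw : String), Dom_depth0_split_py col_list_raw → Spec_depth0_split_py col_list_raw (depth0_split_py col_list_raw)

-- ===== LEMMAS AND PROOFS =====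

-- A's items parameter is a pure accumulator
theorem dsA_items (cs : List Char) : ∀ (d : Int) (cur : List Char) (items : List String),
    dsA cs d cur items = items ++ dsA cs d cur [] := by
  induction cs with
  | nil =>
      intro d cur items
      simp only [dsA]
      split_ifs <;> simp
  | cons c rest ih =>
      intro d cur items
      simp only [dsA]
      split_ifs with h1 h2 h3
      · exact ih _ _ _
      · exact ih _ _ _
      · rw [ih _ [] (items ++ _), ih _ [] ([] ++ _)]
        simp
      · exact ih _ _ _

-- main invariant: B's split of the recorded positions equals A's fold over the suffix,
-- where A's buffer is exactly the slice from the cursor to the current index.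
theorem ds_main (s : List Char) (cs : List Char) :
    ∀ (start' start : Nat) (depth : Int), start ≤ start' → cs = s.drop start' →
    dsBsplit s (dsBpos cs start' depth) start
      = dsA cs depth ((s.drop start).take (start' - start)) [] := by
  induction cs with
  | nil =>
      intro start' start depth hle hdrop
      have hlen : s.length ≤ start' := by
        by_contra h
        have : (s.drop start').length > 0 := by
          simp [List.length_drop]; omega
        rw [← hdrop] at this; simp at this
      have hcur : (s.drop start).take (start' - start) = s.drop start := by
        apply List.take_of_length_le
        simp [List.length_drop]; omega
      simp only [dsBpos, dsBsplit, dsA, hcur]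
      rw [PySem.List.slice_from_natCast]
      by_cases hs : start < s.length
      · have : s.drop start ≠ [] := by
          intro h
          have := congrArg List.length h
          simp [List.length_drop] at this; omega
        simp [hs, this]
      · have : s.drop start = [] := by
          apply List.drop_eq_nil_of_le; omega
        simp [hs, this]
  | cons c rest ih =>
      intro start' start depth hle hdrop
      have hlt : start' < s.length := by
        by_contra h
        have : s.drop start' = [] := List.drop_eq_nil_of_le (by omega)
        rw [this] at hdrop; cases hdrop
      have hrest : rest = s.drop (start' + 1) := by
        have := congrArg List.tail hdrop
        simpa [List.tail_drop] using this
      have hc : s[start']? = some c := by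
        have : (s.drop start')[0]? = some c := by rw [← hdrop]; rfl
        simpa using this
      -- growing the buffer by one char = extending the slice by one position
      have hgrow : (s.drop start).take (start' - start) ++ [c]
          = (s.drop start).take (start' + 1 - start) := by
        have h1 : start' + 1 - start = (start' - start) + 1 := by omega
        rw [h1, List.take_succ]
        have : (s.drop start)[start' - start]? = some c := by
          rw [List.getElem?_drop]
          have : start + (start' - start) = start' := by omega
          rw [this]; exact hc
        simp [this]
      simp only [dsBpos, dsA]
      split_ifs with h1 h2 h3
      · rw [ih (start' + 1) start (depth + 1) (by omega) hrest, hgrow]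
      · rw [ih (start' + 1) start (depth - 1) (by omega) hrest, hgrow]
      · simp only [dsBsplit]
        rw [ih (start' + 1) (start' + 1) depth (by omega) hrest]
        rw [dsA_items rest depth [] ([] ++ _)]
        simp only [Nat.sub_self, List.take_zero, List.nil_append]
        rw [PySem.List.slice_natCast]
        simp
      · rw [ih (start' + 1) start depth (by omega) hrest, hgrow]

-- ===== VERDICT (by name: the statement is the Claim_ definition above) =====
theorem depth0_split_py_spec : Claim_equal_depth0_split_py := by
  intro s _
  unfold Spec_depth0_split_py depth0_split_py depth0_split_py_alt
  rw [ds_main s.toList s.toList 0 0 0 (le_refl 0) rfl]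
  simp
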